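-- pv_equiv track=rewrite | github.com/ssun-g/solution | BOJ/python/16139.py | make_psum
-- ===== SOURCE A (Python) =====
-- import string
--
-- def make_psum(S: str) -> list:
--     psum = {a: [0] * (len(S) + 1) for a in string.ascii_lowercase}
--     for i in range(len(S)):
--         alpha = S[i]
--         for k in psum.keys():
--             if k == alpha:
--                 psum[k][i + 1] = psum[k][i] + 1
--             else:
--                 psum[k][i + 1] = psum[k][i]
--
--     return psum
-- ===== SOURCE B (Python) =====
-- import string
--
-- def make_psum(S: str) -> list:
--     n = len(S)
--     pos = [[] for _ in range(26)]
--     for i, c in enumerate(S):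
--         j = ord(c) - ord('a')
--         if 0 <= j < 26:
--             pos[j].append(i)
--     psum = {}
--     for a, ps in zip(string.ascii_lowercase, pos):
--         row = []
--         cnt = 0
--         prev = 0
--         for p in ps:
--             row += [cnt] * (p + 1 - prev)
--             cnt += 1
--             prev = p + 1
--         row += [cnt] * (n + 1 - prev)
--         psum[a] = row
--     return psum
-- ===== Notes on version B (the rewrite author's own statement) =====
-- stated objective: alternative
-- what changed: B replaces A's row-major scan (which updates all 26 preallocated dict-held arrays at every string index) with a bucketing pass that collects each letter's occurrence positions once, then builds each prefix-sum row by run-length expansion between consecutive positions.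
import Mathlib
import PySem

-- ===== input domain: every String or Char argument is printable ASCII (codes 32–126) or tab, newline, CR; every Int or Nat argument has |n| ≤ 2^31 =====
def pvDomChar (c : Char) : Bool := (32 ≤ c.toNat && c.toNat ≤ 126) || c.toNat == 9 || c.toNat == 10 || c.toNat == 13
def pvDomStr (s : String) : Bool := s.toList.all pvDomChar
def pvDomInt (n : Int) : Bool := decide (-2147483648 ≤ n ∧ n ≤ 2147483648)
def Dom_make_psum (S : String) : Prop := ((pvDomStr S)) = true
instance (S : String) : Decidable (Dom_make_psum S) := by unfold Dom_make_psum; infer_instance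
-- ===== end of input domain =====

-- B uses a different algorithm: one bucketing pass collects each letter's occurrence positions,
-- then each prefix-sum row is produced by run-length expansion between consecutive positions,
-- instead of A's row-major scan updating all 26 preallocated arrays at every index.

-- string.ascii_lowercase
def pvLower : List Char := "abcdefghijklmnopqrstuvwxyz".toList

-- ===== PORT A =====
-- A: psum = {a: [0]*(len(S)+1)}; for i in range(len(S)): for k in keys: psum[k][i+1] = psum[k][i] + (1 if k == S[i] else 0).
-- All indices are in range here, so S[i] is ported as getD (exact on in-range indices) and list assignment as List.set.
def make_psum (S : String) : List (String × List Int) :=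
  let cs := S.toList
  let init : List (String × List Int) :=
    pvLower.map (fun a => (String.ofList [a], List.replicate (cs.length + 1) (0 : Int)))
  (List.range cs.length).foldl
    (fun psum i =>
      let alpha := String.ofList [cs.getD i ' ']
      psum.map (fun kv =>
        if kv.1 == alpha then (kv.1, kv.2.set (i + 1) (kv.2.getD i 0 + 1))
        else (kv.1, kv.2.set (i + 1) (kv.2.getD i 0))))
    init

-- ===== PORT B =====
-- B: single pass buckets occurrence positions per letter (pos[j].append is exact as set/getD: j is in range),
-- then each row is built by run-length expansion ([cnt]*(p+1-prev); Python's list*negative = [] matches Int.toNat clamping).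
def pvGroupStep (pos : List (List Int)) (ic : Int × Char) : List (List Int) :=
  let j : Int := (ic.2.toNat : Int) - 97
  if 0 ≤ j ∧ j < 26 then pos.set j.toNat (pos.getD j.toNat [] ++ [ic.1]) else pos

def pvGroup (cs : List Char) : List (List Int) :=
  (PySem.List.enumerate cs).foldl pvGroupStep (List.replicate 26 [])

def pvRowStep (st : List Int × Int × Int) (p : Int) : List Int × Int × Int :=
  (st.1 ++ List.replicate (p + 1 - st.2.2).toNat st.2.1, st.2.1 + 1, p + 1)

def pvRowLoop (n : Nat) (ps : List Int) : List Int :=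
  let st := ps.foldl pvRowStep (([] : List Int), (0 : Int), (0 : Int))
  st.1 ++ List.replicate ((n : Int) + 1 - st.2.2).toNat st.2.1

def make_psum_alt (S : String) : List (String × List Int) :=
  let cs := S.toList
  let pos := pvGroup cs
  (pvLower.zip pos).map (fun ap => (String.ofList [ap.1], pvRowLoop cs.length ap.2))

-- ===== PRECONDITION & SPEC =====
def Spec_make_psum (S : String) (out : List (String × List Int)) : Prop := out = make_psum_alt S
instance (S : String) (out : List (String × List Int)) : Decidable (Spec_make_psum S out) := by unfold Spec_make_psum; infer_instance

-- ===== CLAIM (what is proved, stated in full; the proofs are below) =====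
def Claim_equal_make_psum : Prop := ∀ (S : String), Dom_make_psum S → Spec_make_psum S (make_psum S)

-- ===== LEMMAS AND PROOFS =====

-- indicator count of letter a in the first j characters
def pvCnt (a : Char) (cs : List Char) (j : Nat) : Int :=
  ((cs.take j).map (fun c => if c == a then (1 : Int) else 0)).sum

-- positions (from offset k) of letter a in cs
def pvPosFrom (a : Char) (k : Int) : List Char → List Int
  | [] => []
  | c :: r => if c == a then k :: pvPosFrom a (k + 1) r else pvPosFrom a (k + 1) r

theorem pvCnt_zero (a : Char) (cs : List Char) : pvCnt a cs 0 = 0 := by simp [pvCnt]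

theorem pvCnt_succ (a c : Char) (r : List Char) (t : Nat) :
    pvCnt a (c :: r) (t + 1) = (if c == a then (1:Int) else 0) + pvCnt a r t := by
  simp [pvCnt]

-- ---- A side ----

-- A's outer fold of per-key maps equals a map of per-key folds
theorem pv_map_foldl {α : Type} (g : Nat → α → α) :
    ∀ (l : List Nat) (init : List α),
      l.foldl (fun ps i => ps.map (g i)) init
        = init.map (fun kv => l.foldl (fun kv i => g i kv) kv) := by
  intro l
  induction l with
  | nil => intro init; simp
  | cons x xs ih =>
    intro init
    simp only [List.foldl_cons]
    rw [ih]
    simp [List.map_map]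

-- A's per-key fold invariant
theorem pvA_inv (a : Char) (cs : List Char) :
    ∀ (m : Nat), m ≤ cs.length →
      (List.range m).foldl
        (fun lst i => lst.set (i + 1) (lst.getD i 0 + (if cs.getD i ' ' == a then (1:Int) else 0)))
        (List.replicate (cs.length + 1) (0 : Int))
      = (List.range (m + 1)).map (fun j => pvCnt a cs j)
          ++ List.replicate (cs.length - m) 0 := by
  intro m
  induction m with
  | zero =>
    intro _
    simp [pvCnt, List.replicate_succ]
  | succ m ih =>
    intro hm
    have hm' : m ≤ cs.length := Nat.le_of_succ_le hm
    rw [List.range_succ, List.foldl_append, ih hm']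
    simp only [List.foldl_cons, List.foldl_nil]
    have hlen : ((List.range (m + 1)).map (fun j => pvCnt a cs j)).length = m + 1 := by simp
    have hget : (((List.range (m + 1)).map (fun j => pvCnt a cs j))
        ++ List.replicate (cs.length - m) (0:Int)).getD m 0 = pvCnt a cs m := by
      rw [List.getD_eq_getElem?_getD, List.getElem?_append_left (by omega)]
      simp
    rw [hget]
    have hlt : m < cs.length := hm
    have hstep : pvCnt a cs m + (if cs.getD m ' ' == a then (1:Int) else 0) = pvCnt a cs (m+1) := by
      unfold pvCnt
      rw [List.take_add_one]
      simp [List.getD_eq_getElem?_getD, hlt]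
    rw [hstep]
    have hrep : cs.length - m = (cs.length - (m+1)) + 1 := by omega
    rw [List.set_append_right _ _ (by omega), hlen]
    have h0 : m + 1 - (m + 1) = 0 := by omega
    rw [h0, hrep, List.replicate_succ, List.set_cons_zero]
    rw [List.range_succ (n := m + 1), List.map_append, List.append_assoc]
    simp

-- singleton-string equality reduces to char equality
theorem pv_singleton_beq (a b : Char) :
    (String.ofList [a] == String.ofList [b]) = (a == b) := by
  by_cases h : a = b
  · simp [h]
  · have hne : ¬ (String.ofList [a] = String.ofList [b]) := by
      intro hc
      have := congrArg String.toList hc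
      simp at this
      exact h this
    simp [hne, h]

theorem pvA_entry (a : Char) (cs : List Char) :
    (List.range cs.length).foldl
      (fun (kv : String × List Int) i =>
        let alpha := String.ofList [cs.getD i ' ']
        if kv.1 == alpha then (kv.1, kv.2.set (i + 1) (kv.2.getD i 0 + 1))
        else (kv.1, kv.2.set (i + 1) (kv.2.getD i 0)))
      (String.ofList [a], List.replicate (cs.length + 1) (0 : Int))
    = (String.ofList [a], (List.range (cs.length + 1)).map (fun j => pvCnt a cs j)) := by
  have hfst : ∀ (lst : List Int),
      (List.range cs.length).foldl
        (fun (kv : String × List Int) i =>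
          let alpha := String.ofList [cs.getD i ' ']
          if kv.1 == alpha then (kv.1, kv.2.set (i + 1) (kv.2.getD i 0 + 1))
          else (kv.1, kv.2.set (i + 1) (kv.2.getD i 0)))
        (String.ofList [a], lst)
      = (String.ofList [a],
          (List.range cs.length).foldl
            (fun lst i => lst.set (i + 1) (lst.getD i 0 + (if cs.getD i ' ' == a then (1:Int) else 0)))
            lst) := by
    generalize List.range cs.length = rng
    induction rng with
    | nil => intro lst; simp
    | cons i is ih =>
      intro lst
      simp only [List.foldl_cons, pv_singleton_beq]
      by_cases h : cs.getD i ' ' = a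
      · have ha : (a == cs.getD i ' ') = true := beq_iff_eq.mpr h.symm
        have hb : (cs.getD i ' ' == a) = true := beq_iff_eq.mpr h
        simp only [ha, hb, if_true]
        exact ih _
      · have ha : (a == cs.getD i ' ') = false := by
          simp only [beq_eq_false_iff_ne]; exact fun hc => h hc.symm
        have hb : (cs.getD i ' ' == a) = false := by
          simp only [beq_eq_false_iff_ne]; exact h
        simp only [ha, hb, if_false, Bool.false_eq_true, add_zero]
        exact ih _
  rw [hfst]
  congr 1
  rw [pvA_inv a cs cs.length (le_refl _)]
  simp

-- ---- B side ----

theorem pvPosFrom_cons (a c : Char) (k : Int) (r : List Char) :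
    pvPosFrom a k (c :: r) = if c == a then k :: pvPosFrom a (k + 1) r else pvPosFrom a (k + 1) r := rfl

theorem pvChar_eq_of_toNat {a b : Char} (h : a.toNat = b.toNat) : a = b := by
  apply Char.ext
  exact UInt32.toBitVec_inj.mp (BitVec.toNat_inj.mp h)

theorem pvLower_getD_toNat : ∀ j, j < 26 → (pvLower.getD j ' ').toNat = 97 + j := by decide

theorem pvLower_ne (j : Nat) (hj : j < 26) (c : Char) (hne : c.toNat ≠ 97 + j) :
    (c == pvLower.getD j ' ') = false := by
  apply beq_eq_false_iff_ne.mpr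
  intro hcc
  apply hne
  rw [hcc]
  exact pvLower_getD_toNat j hj

theorem pvGroup_length_aux :
    ∀ (l : List (Int × Char)) (pos : List (List Int)),
      (l.foldl pvGroupStep pos).length = pos.length := by
  intro l
  induction l with
  | nil => intro pos; simp
  | cons x xs ih =>
    intro pos
    simp only [List.foldl_cons]
    rw [ih]
    unfold pvGroupStep
    dsimp only
    split <;> simp

theorem pvGroup_inv (cs : List Char) :
    ∀ (k : Int) (pos : List (List Int)), pos.length = 26 →
      ∀ j, j < 26 →
        ((PySem.List.enumerate cs k).foldl pvGroupStep pos).getD j []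
          = pos.getD j [] ++ pvPosFrom (pvLower.getD j ' ') k cs := by
  induction cs with
  | nil => intro k pos _ j _; simp [PySem.List.enumerate_nil, pvPosFrom]
  | cons c r ih =>
    intro k pos hlen j hj
    rw [PySem.List.enumerate_cons, List.foldl_cons]
    by_cases hc : 0 ≤ (c.toNat : Int) - 97 ∧ (c.toNat : Int) - 97 < 26
    · -- c is a lowercase letter, bucket ((c.toNat:Int)-97).toNat
      have hstep : pvGroupStep pos (k, c)
          = pos.set ((c.toNat : Int) - 97).toNat
              (pos.getD ((c.toNat : Int) - 97).toNat [] ++ [k]) := by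
        unfold pvGroupStep
        dsimp only
        rw [if_pos hc]
      rw [hstep]
      have hlen' : (pos.set ((c.toNat : Int) - 97).toNat
          (pos.getD ((c.toNat : Int) - 97).toNat [] ++ [k])).length = 26 := by simp [hlen]
      rw [ih (k + 1) _ hlen' j hj]
      by_cases hje : ((c.toNat : Int) - 97).toNat = j
      · have hceq : c = pvLower.getD j ' ' := by
          apply pvChar_eq_of_toNat
          rw [pvLower_getD_toNat j hj]
          omega
        rw [hje]
        have hgd : (pos.set j (pos.getD j [] ++ [k])).getD j [] = pos.getD j [] ++ [k] := by
          rw [List.getD_eq_getElem?_getD, List.getElem?_set_self (by omega)]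
          simp
        rw [hgd, pvPosFrom_cons, if_pos (beq_iff_eq.mpr hceq)]
        simp
      · have hcne : (c == pvLower.getD j ' ') = false := pvLower_ne j hj c (by omega)
        have hgd : (pos.set ((c.toNat : Int) - 97).toNat
            (pos.getD ((c.toNat : Int) - 97).toNat [] ++ [k])).getD j [] = pos.getD j [] := by
          rw [List.getD_eq_getElem?_getD, List.getElem?_set_ne hje, ← List.getD_eq_getElem?_getD]
        rw [hgd, pvPosFrom_cons, if_neg (by simpa using beq_eq_false_iff_ne.mp hcne)]
    · -- c is not a lowercase letter: no bucket touched, no position recorded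
      have hstep : pvGroupStep pos (k, c) = pos := by
        unfold pvGroupStep
        dsimp only
        rw [if_neg hc]
      have hcne : (c == pvLower.getD j ' ') = false := pvLower_ne j hj c (by omega)
      rw [hstep, ih (k + 1) pos hlen j hj, pvPosFrom_cons,
        if_neg (by simpa using beq_eq_false_iff_ne.mp hcne)]

theorem pvGroup_length (cs : List Char) : (pvGroup cs).length = 26 := by
  unfold pvGroup
  rw [pvGroup_length_aux]
  simp

theorem pvGroup_getD (cs : List Char) (j : Nat) (hj : j < 26) :
    (pvGroup cs).getD j [] = pvPosFrom (pvLower.getD j ' ') 0 cs := by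
  unfold pvGroup
  rw [pvGroup_inv cs 0 _ (by simp) j hj]
  have h0 : (List.replicate 26 ([] : List Int)).getD j [] = [] := by
    rw [List.getD_eq_getElem?_getD, List.getElem?_replicate]
    simp [hj]
  rw [h0, List.nil_append]

-- peeling one character off the prefix-count row (the two cases of the head character)
theorem pvMap_cnt_cons_pos (a c : Char) (cnt : Int) (r : List Char) (hbeq : (c == a) = true) :
    (List.range ((c :: r).length + 1)).map (fun t => cnt + pvCnt a (c :: r) t)
      = cnt :: (List.range (r.length + 1)).map (fun t => cnt + 1 + pvCnt a r t) := by
  simp only [List.length_cons]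
  rw [List.range_succ_eq_map (n := r.length + 1), List.map_cons, List.map_map]
  congr 1
  · simp [pvCnt_zero]
  · apply List.map_congr_left
    intro t _
    simp only [Function.comp_apply, Nat.succ_eq_add_one, pvCnt_succ, hbeq, if_true]
    ring

theorem pvMap_cnt_cons_neg (a c : Char) (cnt : Int) (r : List Char) (hbeq : (c == a) = false) :
    (List.range ((c :: r).length + 1)).map (fun t => cnt + pvCnt a (c :: r) t)
      = cnt :: (List.range (r.length + 1)).map (fun t => cnt + pvCnt a r t) := by
  simp only [List.length_cons]
  rw [List.range_succ_eq_map (n := r.length + 1), List.map_cons, List.map_map]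
  congr 1
  · simp [pvCnt_zero]
  · apply List.map_congr_left
    intro t _
    simp only [Function.comp_apply, Nat.succ_eq_add_one, pvCnt_succ, hbeq,
      Bool.false_eq_true, if_false, zero_add]

-- B's run-length expansion produces the prefix-count row
theorem pvRow_inv (a : Char) :
    ∀ (cs : List Char) (acc : List Int) (cnt : Int) (pr prev : Nat), pr ≤ prev →
      (let st := (pvPosFrom a (prev : Int) cs).foldl pvRowStep (acc, cnt, (pr : Int));
       st.1 ++ List.replicate ((((prev + cs.length : Nat) : Int) + 1 - st.2.2).toNat) st.2.1)
      = acc ++ List.replicate (prev - pr) cnt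
          ++ (List.range (cs.length + 1)).map (fun t => cnt + pvCnt a cs t) := by
  intro cs
  induction cs with
  | nil =>
    intro acc cnt pr prev hpr
    simp only [pvPosFrom, List.foldl_nil, List.length_nil, Nat.add_zero]
    have h1 : (((prev : Nat) : Int) + 1 - (pr : Int)).toNat = (prev - pr) + 1 := by omega
    rw [h1, List.replicate_succ' (n := prev - pr)]
    simp [pvCnt_zero]
  | cons c r ih =>
    intro acc cnt pr prev hpr
    have hcast : ((prev : Int) + 1) = (((prev + 1 : Nat)) : Int) := by push_cast; ring
    by_cases hca : c = a
    · have hbeq : (c == a) = true := beq_iff_eq.mpr hca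
      rw [pvPosFrom_cons, if_pos hbeq]
      simp only [List.foldl_cons]
      have hstep : pvRowStep (acc, cnt, (pr : Int)) (prev : Int)
          = (acc ++ List.replicate ((prev - pr) + 1) cnt, cnt + 1, ((prev + 1 : Nat) : Int)) := by
        unfold pvRowStep
        have h2 : ((prev : Int) + 1 - (pr : Int)).toNat = (prev - pr) + 1 := by omega
        rw [← hcast]
        simp [h2]
      rw [hstep, hcast]
      have hih := ih (acc ++ List.replicate ((prev - pr) + 1) cnt) (cnt + 1) (prev + 1) (prev + 1)
        (le_refl _)
      simp only at hih
      rw [show ((prev + (c :: r).length : Nat) : Int) = (((prev + 1) + r.length : Nat) : Int) by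
          push_cast; simp; ring]
      rw [hih]
      simp only [Nat.sub_self, List.replicate_zero, List.append_nil]
      rw [pvMap_cnt_cons_pos a c cnt r hbeq]
      rw [List.replicate_succ' (n := prev - pr)]
      simp [List.append_assoc]
    · have hbeq : (c == a) = false := beq_eq_false_iff_ne.mpr hca
      rw [pvPosFrom_cons, if_neg (by simp [hbeq])]
      rw [hcast]
      have hih := ih acc cnt pr (prev + 1) (by omega)
      simp only at hih
      rw [show ((prev + (c :: r).length : Nat) : Int) = (((prev + 1) + r.length : Nat) : Int) by
          push_cast; simp; ring]
      rw [hih, pvMap_cnt_cons_neg a c cnt r hbeq]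
      rw [show prev + 1 - pr = (prev - pr) + 1 by omega, List.replicate_succ' (n := prev - pr)]
      simp [List.append_assoc]

theorem pvRow_eq (a : Char) (cs : List Char) :
    pvRowLoop cs.length (pvPosFrom a 0 cs)
      = (List.range (cs.length + 1)).map (fun j => pvCnt a cs j) := by
  unfold pvRowLoop
  have h := pvRow_inv a cs [] 0 0 0 (le_refl _)
  simp only [Nat.zero_add, Nat.sub_zero, List.replicate_zero,
    List.nil_append] at h
  simp only [Nat.cast_zero] at h ⊢
  rw [h]
  simp

-- B's output in closed form
theorem pvB_eq (S : String) :
    make_psum_alt S = pvLower.map (fun a => (String.ofList [a],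
      (List.range (S.toList.length + 1)).map (fun j => pvCnt a S.toList j))) := by
  have h26 : pvLower.length = 26 := by decide
  show (pvLower.zip (pvGroup S.toList)).map
      (fun ap => (String.ofList [ap.1], pvRowLoop S.toList.length ap.2)) = _
  apply List.ext_getElem
  · simp [List.length_zip, pvGroup_length, h26]
  · intro j hj1 hj2
    have hj : j < 26 := by
      simp only [List.length_map, List.length_zip, h26, pvGroup_length] at hj1
      omega
    simp only [List.getElem_map, List.getElem_zip]
    have e1 : (pvGroup S.toList)[j]'(by rw [pvGroup_length]; exact hj)
        = (pvGroup S.toList).getD j [] := by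
      rw [List.getD_eq_getElem?_getD,
        List.getElem?_eq_getElem (by rw [pvGroup_length]; exact hj)]
      simp
    have e2 : pvLower[j]'(by rw [h26]; exact hj) = pvLower.getD j ' ' := by
      rw [List.getD_eq_getElem?_getD, List.getElem?_eq_getElem (by rw [h26]; exact hj)]
      simp
    rw [e1, pvGroup_getD _ j hj, ← e2, pvRow_eq]

-- ===== VERDICT (by name: the statement is the Claim_ definition above) =====
theorem make_psum_spec : Claim_equal_make_psum := by
  intro S _
  unfold Spec_make_psum make_psum
  rw [pv_map_foldl, List.map_map, pvB_eq]
  exact List.map_congr_left (fun a _ => pvA_entry a S.toList)
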